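-- pv_equiv track=rewrite | github.com/WANGHanshuo1220/DistServe | evaluation/2-benchmark-serving/2-benchmark-serving.py | smart_text_cut
-- ===== SOURCE A (Python) =====
-- def smart_text_cut(text: str):
--     ret = []
--
--     length = len(text)
--     cut_index = [int(length*0.8), int(length*0.7),
--                  int(length*0.5), int(length*0.3), length]
--     # cut_index = [int(length*0.8), int(length*0.7)]
--
--     for index in cut_index:
--         cut_index = text.rfind(' ', 0, index)
--
--         if cut_index == -1:
--             ret.append(text[:length])
--         else:
--             ret.append(text[:cut_index])
--
--     return ret
-- ===== SOURCE B (Python) =====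
-- def _bisect_left(a, x):
--     lo, hi = 0, len(a)
--     while lo < hi:
--         mid = (lo + hi) // 2
--         if a[mid] < x:
--             lo = mid + 1
--         else:
--             hi = mid
--     return lo
--
--
-- def _cut_at(text, spaces, index):
--     k = _bisect_left(spaces, index)
--     if k == 0:
--         return text
--     return text[:spaces[k - 1]]
--
--
-- def smart_text_cut(text: str):
--     length = len(text)
--     spaces = [i for i, c in enumerate(text) if c == ' ']
--     cuts = [int(length * 0.8), int(length * 0.7),
--             int(length * 0.5), int(length * 0.3), length]
--     return [_cut_at(text, spaces, index) for index in cuts]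
-- ===== Notes on version B (the rewrite author's own statement) =====
-- stated objective: alternative
-- what changed: B precomputes a sorted table of all space positions in one scan and answers each of the five cut positions with a hand-rolled binary search (bisect_left) over that table, instead of A's repeated backward rfind rescans of prefixes.
import Mathlib
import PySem

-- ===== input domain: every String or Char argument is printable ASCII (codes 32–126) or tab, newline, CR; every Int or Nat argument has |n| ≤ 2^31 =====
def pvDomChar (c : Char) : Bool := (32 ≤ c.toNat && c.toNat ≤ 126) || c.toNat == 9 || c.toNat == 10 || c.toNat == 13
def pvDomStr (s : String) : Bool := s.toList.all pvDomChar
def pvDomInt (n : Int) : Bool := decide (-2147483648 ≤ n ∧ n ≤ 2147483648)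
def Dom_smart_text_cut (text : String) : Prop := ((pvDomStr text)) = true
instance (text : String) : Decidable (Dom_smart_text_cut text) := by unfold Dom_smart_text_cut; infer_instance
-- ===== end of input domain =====

-- B replaces A's five backward rfind rescans by one scan building the sorted table of space
-- positions plus a hand-rolled binary search per cut position (alternative decomposition, not
-- claimed faster).

-- ===== PORT A =====
-- Exact model of CPython's int(n * c) for 0 ≤ n and a positive float constant c = M / 2^E:
-- round n to the nearest double (53 significant bits, ties to even), multiply by the exactly
-- represented constant, round the product again, truncate.  Exact whenever float(n) does not
-- overflow (see Pre_smart_text_cut).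
def pvRnd53 (p : Nat) : Nat :=
  let b := Nat.log2 p
  if b ≤ 52 then p
  else
    let sh := b - 52
    let m := p / 2 ^ sh
    let r := p % 2 ^ sh
    let half := 2 ^ (sh - 1)
    if half < r ∨ (r = half ∧ m % 2 = 1) then (m + 1) * 2 ^ sh else m * 2 ^ sh

def pvIntMulFloat (n M E : Nat) : Nat := pvRnd53 (pvRnd53 n * M) / 2 ^ E

-- the five cut positions [int(length*0.8), int(length*0.7), int(length*0.5), int(length*0.3), length]
-- (the same source expressions occur verbatim in A and in B; 0.8 = 3602879701896397/2^52, etc.)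
def pvCuts (length : Nat) : List Int :=
  [(pvIntMulFloat length 3602879701896397 52 : Int),
   (pvIntMulFloat length 3152519739159347 52 : Int),
   (pvIntMulFloat length 1 1 : Int),
   (pvIntMulFloat length 5404319552844595 54 : Int),
   (length : Int)]

def smart_text_cut (text : String) : List String :=
  let length : Nat := text.toList.length
  let cut_index : List Int := pvCuts length
  cut_index.foldl
    (fun ret index =>
      let ci := PySem.Str.rfindFrom text " " 0 (some index)
      if ci = -1 then ret ++ [PySem.Str.slice text none (some (length : Int))]
      else ret ++ [PySem.Str.slice text none (some ci)])
    []

-- ===== PORT B =====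
def pvBisectLeft (a : List Int) (x : Int) (lo hi : Nat) : Nat :=
  if h : lo < hi then
    let mid := (lo + hi) / 2
    if a.getD mid 0 < x then pvBisectLeft a x (mid + 1) hi else pvBisectLeft a x lo mid
  else lo
termination_by hi - lo
decreasing_by
  · have h1 : lo ≤ (lo + hi) / 2 := (Nat.le_div_iff_mul_le (by norm_num)).mpr (by omega)
    have h2 : (lo + hi) / 2 < hi := (Nat.div_lt_iff_lt_mul (by norm_num)).mpr (by omega)
    omega
  · have h1 : lo ≤ (lo + hi) / 2 := (Nat.le_div_iff_mul_le (by norm_num)).mpr (by omega)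
    have h2 : (lo + hi) / 2 < hi := (Nat.div_lt_iff_lt_mul (by norm_num)).mpr (by omega)
    omega

def pvSpaces (s : List Char) : List Int :=
  (PySem.List.enumerate s 0).filterMap (fun p => if p.2 = ' ' then some p.1 else none)

def pvCutAt (text : String) (spaces : List Int) (index : Int) : String :=
  let k := pvBisectLeft spaces index 0 spaces.length
  if k = 0 then text
  else PySem.Str.slice text none (some (spaces.getD (k - 1) 0))

def smart_text_cut_alt (text : String) : List String :=
  let length : Nat := text.toList.length
  let spaces : List Int := pvSpaces text.toList
  (pvCuts length).map (fun index => pvCutAt text spaces index)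

-- ===== PRECONDITION & SPEC =====
-- Pre_ excludes only the (physically unreachable) strings whose length does not fit in a
-- double: there CPython's `length*0.8` raises OverflowError ('int too large to convert to
-- float').  A returns normally on every shorter string.
-- the bound is the numeral 2^1024 - 2^970 (a literal so that `decide` evaluates it directly)
def Pre_smart_text_cut (text : String) : Prop := text.toList.length < 179769313486231580793728971405303415079934132710037826936173778980444968292764750946649017977587207096330286416692887910946555547851940402630657488671505820681908902000708383676273854845817711531764475730270069855571366959622842914819860834936475292719074168444365510704342711559699508093042880177904174497792
instance (text : String) : Decidable (Pre_smart_text_cut text) := by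
  unfold Pre_smart_text_cut; infer_instance

def pvWitness_smart_text_cut : String := "hello world etc"

def Spec_smart_text_cut (text : String) (out : List String) : Prop := out = smart_text_cut_alt text
instance (text : String) (out : List String) : Decidable (Spec_smart_text_cut text out) := by unfold Spec_smart_text_cut; infer_instance

-- ===== CLAIM (what is proved, stated in full; the proofs are below) =====
def Claim_equal_smart_text_cut : Prop := ∀ (text : String), Dom_smart_text_cut text → Pre_smart_text_cut text → Spec_smart_text_cut text (smart_text_cut text)

-- ===== LEMMAS AND PROOFS =====

-- A's loop body, as a function of one cut position
def pvCutA (text : String) (length : Nat) (index : Int) : String :=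
  let ci := PySem.Str.rfindFrom text " " 0 (some index)
  if ci = -1 then PySem.Str.slice text none (some (length : Int))
  else PySem.Str.slice text none (some ci)

lemma pv_foldl_push {α β : Type} (g : α → β) (l : List α) (acc : List β)
    (f : List β → α → List β) (h : ∀ r i, f r i = r ++ [g i]) :
    l.foldl f acc = acc ++ l.map g := by
  induction l generalizing acc with
  | nil => simp
  | cons a t ih => simp [List.foldl, h, ih]

lemma pv_A_as_map (text : String) :
    smart_text_cut text = (pvCuts text.toList.length).map (pvCutA text text.toList.length) := by
  simp only [smart_text_cut]
  rw [pv_foldl_push (pvCutA text text.toList.length)]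
  · simp
  · intro r i
    simp only [pvCutA]
    split_ifs <;> rfl

lemma pv_mem_pvCuts (n : Nat) (i : Int) (h : i ∈ pvCuts n) : ∃ m : Nat, i = (m : Int) := by
  simp [pvCuts] at h
  rcases h with h | h | h | h | h <;> exact ⟨_, h⟩

-- ----- the space table -----

lemma pv_mem_pvSpaces (s : List Char) (v : Int) :
    v ∈ pvSpaces s ↔ ∃ k : Nat, ∃ _ : k < s.length, v = (k : Int) ∧ s[k] = ' ' := by
  unfold pvSpaces
  simp only [List.mem_filterMap, PySem.List.mem_enumerate_iff]
  constructor
  · rintro ⟨⟨a, c⟩, ⟨k, hk, hp⟩, hf⟩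
    cases hp
    by_cases hc : s[k] = ' '
    · exact ⟨k, hk, by simpa [hc] using hf.symm, hc⟩
    · simp [hc] at hf
  · rintro ⟨k, hk, rfl, hc⟩
    exact ⟨((k : Int), s[k]), ⟨k, hk, by simp⟩, by simp [hc]⟩

lemma pv_pvSpaces_sorted (s : List Char) : (pvSpaces s).Pairwise (· < ·) := by
  unfold pvSpaces
  refine List.Pairwise.filterMap _ ?_ (PySem.List.pairwise_lt_enumerate s 0)
  rintro ⟨a, c⟩ ⟨a', c'⟩ h v hv v' hv'
  by_cases hc : c = ' ' <;> simp [hc] at hv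
  by_cases hc' : c' = ' ' <;> simp [hc'] at hv'
  simpa [← hv, ← hv'] using h

-- ----- binary search -----

lemma pv_bisect_spec (a : List Int) (x : Int) (hs : a.Pairwise (· ≤ ·)) :
    ∀ fuel lo hi, hi - lo ≤ fuel → lo ≤ hi → hi ≤ a.length →
      (∀ j : Nat, ∀ _ : j < a.length, j < lo → a[j] < x) →
      (∀ j : Nat, ∀ _ : j < a.length, hi ≤ j → x ≤ a[j]) →
      lo ≤ pvBisectLeft a x lo hi ∧ pvBisectLeft a x lo hi ≤ hi ∧
      (∀ j : Nat, ∀ _ : j < a.length, j < pvBisectLeft a x lo hi → a[j] < x) ∧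
      (∀ j : Nat, ∀ _ : j < a.length, pvBisectLeft a x lo hi ≤ j → x ≤ a[j]) := by
  have hmono : ∀ i j : Nat, ∀ _ : i < a.length, ∀ _ : j < a.length, i ≤ j → a[i] ≤ a[j] := by
    intro i j hi hj hij
    rcases Nat.lt_or_ge i j with h | h
    · exact (List.pairwise_iff_getElem.mp hs) i j hi hj h
    · have : i = j := by omega
      subst this; rfl
  intro fuel
  induction fuel with
  | zero =>
    intro lo hi hf hle hlen hlo hhi
    have : ¬ lo < hi := by omega
    rw [pvBisectLeft, dif_neg this]
    exact ⟨le_refl _, by omega, fun j hj hjlo => hlo j hj hjlo,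
      fun j hj hjlo => hhi j hj (by omega)⟩
  | succ n ih =>
    intro lo hi hf hle hlen hlo hhi
    by_cases h : lo < hi
    · rw [pvBisectLeft]
      simp only [dif_pos h]
      have h1 : lo ≤ (lo + hi) / 2 := (Nat.le_div_iff_mul_le (by norm_num)).mpr (by omega)
      have h2 : (lo + hi) / 2 < hi := (Nat.div_lt_iff_lt_mul (by norm_num)).mpr (by omega)
      have hmidlen : (lo + hi) / 2 < a.length := by omega
      rw [List.getD_eq_getElem?_getD, List.getElem?_eq_getElem hmidlen]
      simp only [Option.getD_some]
      by_cases hc : a[(lo + hi) / 2] < x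
      · rw [if_pos hc]
        have := ih ((lo + hi) / 2 + 1) hi (by omega) (by omega) hlen
          (fun j hj hjlo => lt_of_le_of_lt (hmono j _ hj hmidlen (by omega)) hc) hhi
        exact ⟨by omega, this.2.1, this.2.2.1, this.2.2.2⟩
      · rw [if_neg hc]
        push_neg at hc
        have := ih lo ((lo + hi) / 2) (by omega) (by omega) (by omega) hlo
          (fun j hj hjlo => le_trans hc (hmono _ j hmidlen hj hjlo))
        exact ⟨this.1, by omega, this.2.2.1, this.2.2.2⟩
    · rw [pvBisectLeft, dif_neg h]
      exact ⟨le_refl _, by omega, fun j hj hjlo => hlo j hj hjlo,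
        fun j hj hjlo => hhi j hj (by omega)⟩

-- ----- rfind -----

lemma pv_singleton_isPrefixOf (c : Char) (l : List Char) :
    [c].isPrefixOf l = true ↔ l[0]? = some c := by
  cases l with
  | nil => simp [List.isPrefixOf]
  | cons a t =>
    simp [List.isPrefixOf]
    constructor
    · exact fun h => h.symm
    · exact fun h => h.symm

lemma pv_rfind_go_spec (cs : List Char) (c : Char) :
    ∀ j : Nat,
      ((∀ i : Nat, i ≤ j → cs[i]? ≠ some c) → PySem.Chars.rfind.go cs [c] j = -1) ∧
      (∀ i0 : Nat, i0 ≤ j → cs[i0]? = some c → (∀ i : Nat, i0 < i → i ≤ j → cs[i]? ≠ some c) →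
        PySem.Chars.rfind.go cs [c] j = (i0 : Int)) := by
  intro j
  induction j with
  | zero =>
    constructor
    · intro h
      rw [PySem.Chars.rfind.go]
      rw [if_neg]
      intro hp
      exact h 0 (le_refl 0) ((pv_singleton_isPrefixOf c cs).mp hp)
    · intro i0 hi0 hc _
      interval_cases i0
      rw [PySem.Chars.rfind.go, if_pos ((pv_singleton_isPrefixOf c cs).mpr (by simpa using hc))]
      norm_num
  | succ n ih =>
    have hstep : PySem.Chars.rfind.go cs [c] (n + 1) =
        if [c].isPrefixOf (cs.drop (n + 1)) then ((n : Int) + 1) else PySem.Chars.rfind.go cs [c] n := by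
      rw [PySem.Chars.rfind.go]
      split_ifs with h <;> simp
    have hdrop : ([c].isPrefixOf (cs.drop (n + 1)) = true) ↔ cs[n + 1]? = some c := by
      rw [pv_singleton_isPrefixOf]
      simp [List.getElem?_drop]
    constructor
    · intro h
      rw [hstep, if_neg (fun hp => h (n + 1) (le_refl _) (hdrop.mp hp))]
      exact ih.1 (fun i hi => h i (by omega))
    · intro i0 hi0 hc hmax
      by_cases he : i0 = n + 1
      · subst he
        rw [hstep, if_pos (hdrop.mpr hc)]
        push_cast; ring
      · rw [hstep, if_neg (fun hp => hmax (n + 1) (by omega) (le_refl _) (hdrop.mp hp))]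
        exact ih.2 i0 (by omega) hc (fun i h1 h2 => hmax i h1 (by omega))

lemma pv_rfindFrom_eq (s : List Char) (m : Nat) :
    PySem.Chars.rfindFrom s [' '] 0 (some (m : Int)) =
      PySem.Chars.rfind (s.take (min s.length m)) [' '] := by
  rw [PySem.Chars.rfindFrom]
  have h0 : ¬ ((0 : Int) < 0) := by omega
  simp only [h0, if_false]
  by_cases hlt : (s.length : Int) < (m : Int)
  · have hm : ¬ ((m : Int) < 0) := by omega
    have he : ¬ ((s.length : Int) < (0 : Int)) := by omega
    simp only [if_pos hlt, if_neg he]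
    have : (s.length : Int).toNat = s.length := by omega
    rw [this]
    have hmin : min s.length m = s.length := by omega
    rw [hmin]
    simp only [Int.toNat_zero, List.drop_zero]
    split_ifs with h <;> omega
  · have hm : ¬ ((m : Int) < 0) := by omega
    have he : ¬ ((m : Int) < (0 : Int)) := by omega
    simp only [if_neg hlt, if_neg hm]
    have : (m : Int).toNat = m := by omega
    rw [this]
    have hmin : min s.length m = m := by omega
    rw [hmin]
    simp only [Int.toNat_zero, List.drop_zero]
    split_ifs with h <;> omega

-- take-prefix indexing
lemma pv_take_get (s : List Char) (e i : Nat) :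
    (s.take e)[i]? = some ' ' ↔ i < e ∧ s[i]? = some ' ' := by
  constructor
  · intro h
    have hlen : i < (s.take e).length := (List.getElem?_eq_some_iff.mp h).1
    have hi : i < e := by simp at hlen; omega
    refine ⟨hi, ?_⟩
    rwa [List.getElem?_take_of_lt hi] at h
  · rintro ⟨hi, h⟩
    rwa [List.getElem?_take_of_lt hi]

-- ----- the per-cut-position equality -----

lemma pv_cut_eq (text : String) (m : Nat) :
    pvCutA text text.toList.length (m : Int) = pvCutAt text (pvSpaces text.toList) (m : Int) := by
  set s := text.toList with hs
  set S := pvSpaces s with hS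
  have hsortedlt := pv_pvSpaces_sorted s
  have hsorted : S.Pairwise (· ≤ ·) := hsortedlt.imp (fun h => le_of_lt h)
  -- bisect characterisation
  obtain ⟨hk0, hkle, hklt, hkge⟩ :=
    pv_bisect_spec S (m : Int) hsorted S.length 0 S.length (by omega) (by omega) (le_refl _)
      (by omega) (by intro j hj hjl; omega)
  set k := pvBisectLeft S (m : Int) 0 S.length with hk
  -- the rfind value
  have hrf : PySem.Str.rfindFrom text " " 0 (some (m : Int)) =
      PySem.Chars.rfind (s.take (min s.length m)) [' '] := by
    rw [PySem.Str.rfindFrom_eq]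
    rw [show (" " : String).toList = [' '] by rfl]
    exact pv_rfindFrom_eq s m
  set e := min s.length m with he
  unfold pvCutA pvCutAt
  rw [hrf]
  by_cases hkz : k = 0
  · -- no space strictly below m: rfind must be -1
    have hnone : ∀ i : Nat, i ≤ (s.take e).length → (s.take e)[i]? ≠ some ' ' := by
      intro i _ hi
      obtain ⟨hie, hsi⟩ := (pv_take_get s e i).mp hi
      have hilen : i < s.length := (List.getElem?_eq_some_iff.mp hsi).1
      have hmem : (i : Int) ∈ S := by
        rw [hS, pv_mem_pvSpaces]
        exact ⟨i, hilen, rfl, by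
          have := hsi; rwa [List.getElem?_eq_getElem hilen, Option.some_inj] at this⟩
      obtain ⟨j, hjlen, hjval⟩ := List.mem_iff_getElem.mp hmem
      have := hkge j hjlen (by omega)
      rw [hjval] at this
      omega
    have : PySem.Chars.rfind (s.take e) [' '] = -1 := by
      rw [PySem.Chars.rfind]
      exact (pv_rfind_go_spec (s.take e) ' ' (s.take e).length).1
        (fun i hi => hnone i hi)
    rw [this, if_pos rfl, ← hk, if_pos hkz]
    -- text[:len] = text
    apply String.toList_inj.mp
    rw [PySem.Str.toList_slice]
    simp [PySem.List.slice_to_natCast, hs]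
  · -- k ≥ 1 : the answer is S[k-1]
    have hk1 : k - 1 < S.length := by omega
    obtain ⟨j0n, hj0len, hj0val, hj0sp⟩ :=
      (pv_mem_pvSpaces s S[k - 1]).mp (List.getElem_mem hk1)
    have hj0lt : (j0n : Int) < (m : Int) := by
      rw [← hj0val]; exact hklt (k - 1) hk1 (by omega)
    have hj0m : j0n < m := by exact_mod_cast hj0lt
    have hj0e : j0n < e := by omega
    have hfound : (s.take e)[j0n]? = some ' ' := by
      rw [pv_take_get]
      exact ⟨hj0e, by rw [List.getElem?_eq_getElem hj0len, hj0sp]⟩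
    have hmax : ∀ i : Nat, j0n < i → i ≤ (s.take e).length → (s.take e)[i]? ≠ some ' ' := by
      intro i hgt _ hi
      obtain ⟨hie, hsi⟩ := (pv_take_get s e i).mp hi
      have hilen : i < s.length := (List.getElem?_eq_some_iff.mp hsi).1
      have hmem : (i : Int) ∈ S := by
        rw [hS, pv_mem_pvSpaces]
        exact ⟨i, hilen, rfl, by
          have := hsi; rwa [List.getElem?_eq_getElem hilen, Option.some_inj] at this⟩
      obtain ⟨j, hjlen, hjval⟩ := List.mem_iff_getElem.mp hmem
      by_cases hjk : j < k
      · -- then S[j] ≤ S[k-1] = j0n, contradicting j0n < i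
        have hle : S[j] ≤ S[k - 1] := by
          rcases Nat.lt_or_ge j (k - 1) with h | h
          · exact le_of_lt ((List.pairwise_iff_getElem.mp hsortedlt) j (k - 1) hjlen hk1 h)
          · have : j = k - 1 := by omega
            subst this; rfl
        rw [hjval, hj0val] at hle
        have : i ≤ j0n := by exact_mod_cast hle
        omega
      · have := hkge j hjlen (by omega)
        rw [hjval] at this
        have : m ≤ i := by exact_mod_cast this
        have hie' : i < e := hie
        omega
    have hj0e' : j0n ≤ (s.take e).length := by
      have : e ≤ s.length := by omega
      simp [List.length_take]; omega
    have hrv : PySem.Chars.rfind (s.take e) [' '] = (j0n : Int) := by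
      rw [PySem.Chars.rfind]
      exact (pv_rfind_go_spec (s.take e) ' ' (s.take e).length).2 j0n hj0e' hfound
        (fun i h1 h2 => hmax i h1 h2)
    have hne : ¬ ((j0n : Int) = -1) := by omega
    rw [hrv, if_neg hne, ← hk, if_neg hkz]
    congr 1
    rw [List.getD_eq_getElem?_getD, List.getElem?_eq_getElem hk1, Option.getD_some, ← hj0val]

-- ===== VERDICT (by name: the statement is the Claim_ definition above) =====
theorem smart_text_cut_spec : Claim_equal_smart_text_cut := by
  intro text _ _
  unfold Spec_smart_text_cut
  rw [pv_A_as_map]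
  unfold smart_text_cut_alt
  apply List.map_congr_left
  intro i hi
  obtain ⟨m, rfl⟩ := pv_mem_pvCuts _ i hi
  exact pv_cut_eq text m
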